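-- pv_equiv track=rewrite | github.com/NicLarUniversidad/IR | LazyBM-Python/src/Compressor.py | getEliasGamma
-- ===== SOURCE A (Python) =====
-- def getEliasGamma(number):
--     if number == 0:
--         bitStr = "0"
--     else:
--         bitStr = "1"
--         i = 0
--         base = 2 ** i
--         while base < number:
--             bitStr = "0" + bitStr
--             i += 1
--             base = 2 ** i
--         if i > 0:
--             base = 2 ** (i - 1)
--             bitStr = bitStr[1:]
--         rest = number - base
--         restBitStr = "0" * rest
--         bitStr += restBitStr + "1"
--     return bitStr
-- ===== SOURCE B (Python) =====
-- def getEliasGamma(number):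
--     if number == 0:
--         return "0"
--     if number <= 1:
--         return "11"
--     i = (number - 1).bit_length()
--     base = 1 << (i - 1)
--     return "0" * (i - 1) + "1" + "0" * (number - base) + "1"
-- ===== Notes on version B (the rewrite author's own statement) =====
-- stated objective: idiomatic
-- what changed: Replaces the while-loop that doubles base and prepends '0' one character at a time with a closed-form exponent via (number-1).bit_length() and a single direct string assembly.
import Mathlib
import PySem

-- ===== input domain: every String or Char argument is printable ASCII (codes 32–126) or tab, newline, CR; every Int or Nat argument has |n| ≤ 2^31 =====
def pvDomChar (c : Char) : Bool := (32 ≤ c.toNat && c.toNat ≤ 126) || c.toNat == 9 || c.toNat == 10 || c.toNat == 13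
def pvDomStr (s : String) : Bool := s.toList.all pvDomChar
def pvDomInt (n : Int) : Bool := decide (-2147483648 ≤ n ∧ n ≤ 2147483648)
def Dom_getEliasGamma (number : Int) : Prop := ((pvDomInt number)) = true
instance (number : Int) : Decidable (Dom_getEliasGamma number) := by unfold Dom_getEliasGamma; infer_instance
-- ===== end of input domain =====

-- B replaces A's doubling while-loop with a closed-form exponent via bit_length (idiomatic, O(1) exponent search).

-- ===== PORT A =====
-- the while-loop: bitStr prepended with '0' and i incremented while 2**i < number
def getEliasGammaLoop (number : Int) (bitStr : List Char) (i : Nat) : List Char × Nat :=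
  if (2:Int)^i < number then getEliasGammaLoop number ('0' :: bitStr) (i+1) else (bitStr, i)
termination_by number.toNat + 1 - 2^i
decreasing_by
  have h1 : (2:Nat)^i < number.toNat + 1 := by
    have : ((2:Nat)^i : Int) < number := by push_cast; omega
    omega
  have h2 : (2:Nat)^i < 2^(i+1) := Nat.pow_lt_pow_right (by norm_num) (Nat.lt_succ_self i)
  omega

-- strings are handled on the List Char side (PySem style); "0"*rest with rest possibly ≤ 0 is replicate rest.toNat
def getEliasGamma (number : Int) : String :=
  if number = 0 then "0"
  else
    let p := getEliasGammaLoop number ['1'] 0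
    let bitStr := p.1
    let i := p.2
    let base : Int := 2^i
    let bb := if i > 0 then (PySem.List.slice bitStr (some 1) none, (2:Int)^(i-1)) else (bitStr, base)
    String.ofList (bb.1 ++ List.replicate (number - bb.2).toNat '0' ++ ['1'])

-- ===== PORT B =====
def getEliasGamma_alt (number : Int) : String :=
  if number = 0 then "0"
  else if number ≤ 1 then "11"
  else
    let i := PySem.Int.bitLength (number - 1)
    let base : Int := 1 <<< (i - 1)
    String.ofList (List.replicate (i-1) '0' ++ '1' :: (List.replicate (number - base).toNat '0' ++ ['1']))

-- ===== PRECONDITION & SPEC =====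
def Spec_getEliasGamma (number : Int) (out : String) : Prop := out = getEliasGamma_alt number
instance (number : Int) (out : String) : Decidable (Spec_getEliasGamma number out) := by unfold Spec_getEliasGamma; infer_instance

-- ===== CLAIM (what is proved, stated in full; the proofs are below) =====
def Claim_equal_getEliasGamma : Prop := ∀ (number : Int), Dom_getEliasGamma number → Spec_getEliasGamma number (getEliasGamma number)

-- ===== LEMMAS AND PROOFS =====

-- the loop climbs from i to the target exponent t, prepending one '0' per step
lemma getEliasGammaLoop_spec (number : Int) (t : Nat)
    (hub : number ≤ 2^t) (hlb : ∀ j, j < t → (2:Int)^j < number) :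
    ∀ (k i : Nat) (s : List Char), i + k = t →
      getEliasGammaLoop number s i = (List.replicate k '0' ++ s, t) := by
  intro k
  induction k with
  | zero =>
    intro i s hi
    rw [getEliasGammaLoop]
    simp only [Nat.add_zero] at hi
    subst hi
    rw [if_neg (by omega)]
    simp
  | succ k ih =>
    intro i s hi
    rw [getEliasGammaLoop]
    rw [if_pos (hlb i (by omega))]
    rw [ih (i+1) ('0' :: s) (by omega)]
    rw [List.replicate_succ' (n := k)]
    simp

lemma getEliasGamma_eq_alt (number : Int) : getEliasGamma number = getEliasGamma_alt number := by
  by_cases h0 : number = 0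
  · simp [getEliasGamma, getEliasGamma_alt, h0]
  by_cases h1 : number ≤ 1
  · -- loop does not run: 2^0 = 1 < number is false
    rw [getEliasGamma, getEliasGammaLoop, if_neg h0, if_neg (by simpa using h1)]
    rw [getEliasGamma_alt, if_neg h0, if_pos h1]
    have hz : number.toNat - 1 = 0 := by omega
    simp [hz]
  · -- number ≥ 2: the loop stops at t = bitLength (number - 1)
    replace h1 : 1 < number := by omega
    set t := PySem.Int.bitLength (number - 1) with ht
    have hna : (number - 1).natAbs = (number - 1).toNat := by omega
    have hub' : (number - 1).natAbs < 2^t := PySem.Int.lt_two_pow_bitLength _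
    have hlb' : 2^(t-1) ≤ (number - 1).natAbs := PySem.Int.two_pow_bitLength_le _ (by omega)
    have htpos : 0 < t := by
      by_contra hc
      have : t = 0 := by omega
      rw [this] at hub'
      omega
    have hub : number ≤ 2^t := by
      have : ((2:Nat)^t : Int) = (2:Int)^t := by push_cast; ring
      omega
    have hlb : ∀ j, j < t → (2:Int)^j < number := by
      intro j hj
      have h2 : (2:Nat)^j ≤ 2^(t-1) := Nat.pow_le_pow_right (by norm_num) (by omega)
      have : ((2:Nat)^j : Int) = (2:Int)^j := by push_cast; ring
      omega
    rw [getEliasGamma, if_neg h0,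
        getEliasGammaLoop_spec number t hub hlb t 0 ['1'] (by omega)]
    rw [getEliasGamma_alt, if_neg h0, if_neg (by omega)]
    have hrep : List.replicate t '0' = '0' :: List.replicate (t-1) '0' := by
      conv_lhs => rw [show t = (t-1)+1 by omega]
      rw [List.replicate_succ]
    have hbase : ((1 <<< (t-1) : Nat) : Int) = 2^(t-1) := by push_cast [Nat.shiftLeft_eq]; ring
    simp only [← ht, gt_iff_lt, htpos, if_pos, hrep, PySem.List.slice_from_one,
      List.cons_append, List.tail_cons, hbase]
    simp [List.append_assoc]

-- ===== VERDICT (by name: the statement is the Claim_ definition above) =====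
theorem getEliasGamma_spec : Claim_equal_getEliasGamma := by
  intro number _
  exact getEliasGamma_eq_alt number
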